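-- pv_equiv track=rewrite | github.com/StochasticResult/roughTest | services/s2p_parser.py | _parse_option_line
-- ===== SOURCE A (Python) =====
-- from typing import Tuple
--
-- _FREQ_MULTIPLIER = {
--     "HZ": 1.0,
--     "KHZ": 1e3,
--     "MHZ": 1e6,
--     "GHZ": 1e9,
-- }
--
-- def _parse_option_line(line: str) -> Tuple[str, str]:
--     """Extract frequency unit and data format from the option line."""
--     tokens = line.upper().replace("#", "").split()
--     freq_unit = "GHZ"
--     data_format = "MA"
--
--     for tok in tokens:
--         if tok in _FREQ_MULTIPLIER:
--             freq_unit = tok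
--         elif tok in ("DB", "MA", "RI"):
--             data_format = tok
--     return freq_unit, data_format
-- ===== SOURCE B (Python) =====
-- _FREQ_MULTIPLIER = {
--     "HZ": 1.0,
--     "KHZ": 1e3,
--     "MHZ": 1e6,
--     "GHZ": 1e9,
-- }
--
-- def _parse_option_line(line):
--     """Extract frequency unit and data format from the option line."""
--     tokens = line.upper().replace("#", "").split()
--     freq_unit = next((t for t in reversed(tokens) if t in _FREQ_MULTIPLIER), "GHZ")
--     data_format = next((t for t in reversed(tokens) if t in ("DB", "MA", "RI")), "MA")
--     return freq_unit, data_format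
-- ===== Notes on version B (the rewrite author's own statement) =====
-- stated objective: simpler
-- what changed: Replaced the single accumulating loop over the tokens by two independent first-match scans over the reversed token list (next(...) with a default), one per output field.
import Mathlib
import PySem

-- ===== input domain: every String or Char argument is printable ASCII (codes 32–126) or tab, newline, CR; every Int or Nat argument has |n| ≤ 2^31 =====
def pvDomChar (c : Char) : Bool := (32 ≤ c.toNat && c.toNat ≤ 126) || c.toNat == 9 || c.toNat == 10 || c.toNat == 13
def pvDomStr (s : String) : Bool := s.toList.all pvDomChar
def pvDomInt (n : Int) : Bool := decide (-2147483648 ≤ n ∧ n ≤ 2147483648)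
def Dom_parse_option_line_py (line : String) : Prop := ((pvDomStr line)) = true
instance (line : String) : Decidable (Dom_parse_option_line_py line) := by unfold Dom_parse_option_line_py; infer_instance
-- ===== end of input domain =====

-- B replaces A's single accumulating loop by two independent last-match scans
-- (first match over the reversed tokens), one per output field; objective: simpler.

-- ===== PORT A =====
-- only the KEYS of _FREQ_MULTIPLIER are used by the function; its float values are irrelevant here
def pvFreqKeys : List String := ["HZ", "KHZ", "MHZ", "GHZ"]
def pvFmtKeys : List String := ["DB", "MA", "RI"]

def pvStepA (st : String × String) (tok : String) : String × String :=
  if tok ∈ pvFreqKeys then (tok, st.2)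
  else if tok ∈ pvFmtKeys then (st.1, tok)
  else st

def parse_option_line_py (line : String) : String × String :=
  let tokens := PySem.Str.split₀ (PySem.Str.replace (PySem.Str.upper line) "#" "")
  tokens.foldl pvStepA ("GHZ", "MA")

-- ===== PORT B =====
def parse_option_line_py_alt (line : String) : String × String :=
  let tokens := PySem.Str.split₀ (PySem.Str.replace (PySem.Str.upper line) "#" "")
  ((tokens.reverse.find? (fun t => decide (t ∈ pvFreqKeys))).getD "GHZ",
   (tokens.reverse.find? (fun t => decide (t ∈ pvFmtKeys))).getD "MA")

-- ===== PRECONDITION & SPEC =====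
def Spec_parse_option_line_py (line : String) (out : String × String) : Prop := out = parse_option_line_py_alt line
instance (line : String) (out : String × String) : Decidable (Spec_parse_option_line_py line out) := by unfold Spec_parse_option_line_py; infer_instance

-- ===== CLAIM (what is proved, stated in full; the proofs are below) =====
def Claim_equal_parse_option_line_py : Prop := ∀ (line : String), Dom_parse_option_line_py line → Spec_parse_option_line_py line (parse_option_line_py line)

-- ===== LEMMAS AND PROOFS =====

theorem pv_fold_eq_find (ts : List String) : ∀ (u d : String),
    ts.foldl pvStepA (u, d) =
      ((ts.reverse.find? (fun t => decide (t ∈ pvFreqKeys))).getD u,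
       (ts.reverse.find? (fun t => decide (t ∈ pvFmtKeys))).getD d) := by
  induction ts with
  | nil => intro u d; simp
  | cons t ts ih =>
    intro u d
    have hdisj : ¬ (t ∈ pvFreqKeys ∧ t ∈ pvFmtKeys) := by
      rintro ⟨h1, h2⟩
      simp [pvFreqKeys, pvFmtKeys] at h1 h2
      rcases h1 with h | h | h | h <;> subst h <;> simp at h2
    simp only [List.foldl_cons, List.reverse_cons, List.find?_append, pvStepA]
    by_cases hf : t ∈ pvFreqKeys
    · have hm' : t ∉ pvFmtKeys := fun h => hdisj ⟨hf, h⟩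
      rw [if_pos hf, ih]
      rcases hFr : ts.reverse.find? (fun t => decide (t ∈ pvFreqKeys)) with _ | x <;>
        rcases hFm : ts.reverse.find? (fun t => decide (t ∈ pvFmtKeys)) with _ | y <;>
          simp [hf, hm']
    · rw [if_neg hf]
      by_cases hm : t ∈ pvFmtKeys
      · rw [if_pos hm, ih]
        rcases hFr : ts.reverse.find? (fun t => decide (t ∈ pvFreqKeys)) with _ | x <;>
          rcases hFm : ts.reverse.find? (fun t => decide (t ∈ pvFmtKeys)) with _ | y <;>
            simp [hf, hm]
      · rw [if_neg hm, ih]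
        rcases hFr : ts.reverse.find? (fun t => decide (t ∈ pvFreqKeys)) with _ | x <;>
          rcases hFm : ts.reverse.find? (fun t => decide (t ∈ pvFmtKeys)) with _ | y <;>
            simp [hf, hm]

-- ===== VERDICT (by name: the statement is the Claim_ definition above) =====
theorem parse_option_line_py_spec : Claim_equal_parse_option_line_py := by
  intro line _
  unfold Spec_parse_option_line_py parse_option_line_py parse_option_line_py_alt
  exact pv_fold_eq_find _ "GHZ" "MA"
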